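-- pv_equiv track=rewrite | github.com/karolinajj/UWR-Courses | WDP-Python/lista8/zad2.py | czy_ukladalne
-- ===== SOURCE A (Python) =====
-- from collections import defaultdict as dd
--
-- def slownik(s):
--     his = dd(int)
--
--     for e in s:
--         if(e not in his):
--             his[e] = 1
--         else:
--             his[e] = his[e] + 1
--     return his
--
-- def czy_ukladalne(slowo1, slowo2):
--
--     slownik1 = slownik(slowo1)
--     slownik2 = slownik(slowo2)
--
--     for e in slowo1:
--         if (e in slownik2) and (slownik1[e] <= slownik2[e]):
--             continue
--         else:
--             return False
--     return True
-- ===== SOURCE B (Python) =====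
-- def czy_ukladalne(slowo1, slowo2):
--     # Sort both words; slowo1's letters fit within slowo2 iff sorted(slowo1)
--     # is a subsequence of sorted(slowo2): greedy two-pointer merge scan.
--     xs = sorted(slowo1)
--     ys = sorted(slowo2)
--     i = j = 0
--     while i < len(xs) and j < len(ys):
--         if xs[i] == ys[j]:
--             i += 1
--         j += 1
--     return i == len(xs)
-- ===== Notes on version B (the rewrite author's own statement) =====
-- stated objective: alternative
-- what changed: Replaces A's histogram-building and per-character count comparison with a sort-based method: sort both words and check with a greedy two-pointer merge scan that sorted(slowo1) is a subsequence of sorted(slowo2); no counts or dictionaries are built.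
import Mathlib
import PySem

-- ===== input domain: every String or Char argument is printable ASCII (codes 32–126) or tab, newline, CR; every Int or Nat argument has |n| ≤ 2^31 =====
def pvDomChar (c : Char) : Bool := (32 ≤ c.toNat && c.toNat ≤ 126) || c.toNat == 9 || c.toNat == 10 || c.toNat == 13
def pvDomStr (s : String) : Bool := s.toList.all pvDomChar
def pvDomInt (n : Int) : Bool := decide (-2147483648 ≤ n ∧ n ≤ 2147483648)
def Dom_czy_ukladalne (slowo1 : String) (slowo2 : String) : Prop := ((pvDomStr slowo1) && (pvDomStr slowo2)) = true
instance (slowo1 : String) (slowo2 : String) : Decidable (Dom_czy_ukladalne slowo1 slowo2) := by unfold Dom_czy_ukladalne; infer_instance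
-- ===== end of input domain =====

-- B sorts both words and greedily checks sorted(slowo1) is a subsequence of sorted(slowo2)
-- (two-pointer merge scan) instead of A's histogram counting; equal return value everywhere.


-- ===== PORT A =====
-- slownik(s): defaultdict histogram built character by character
def slownik (s : List Char) : PySem.Dict Char Int :=
  s.foldl (fun his e =>
    if his.contains e = false then his.insert e 1
    else his.insert e (his.getD e 0 + 1)) PySem.Dict.empty

-- the 'for e in slowo1' loop with its early 'return False'
def czyLoop (d1 d2 : PySem.Dict Char Int) : List Char → Bool
  | [] => true
  | e :: rest =>
    if d2.contains e && decide (d1.getD e 0 ≤ d2.getD e 0) then czyLoop d1 d2 rest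
    else false

def czy_ukladalne (slowo1 : String) (slowo2 : String) : Bool :=
  let slownik1 := slownik slowo1.toList
  let slownik2 := slownik slowo2.toList
  czyLoop slownik1 slownik2 slowo1.toList

-- ===== PORT B =====
-- the 'while i < len(xs) and j < len(ys)' two-pointer merge scan
def twoPointer (xs ys : List Char) (i j : Nat) : Bool :=
  if h : i < xs.length ∧ j < ys.length then
    if xs[i]'h.1 = ys[j]'h.2 then twoPointer xs ys (i + 1) (j + 1)
    else twoPointer xs ys i (j + 1)
  else decide (i = xs.length)
termination_by ys.length - j

def czy_ukladalne_alt (slowo1 : String) (slowo2 : String) : Bool :=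
  let xs := PySem.List.sorted slowo1.toList (fun c => c) false
  let ys := PySem.List.sorted slowo2.toList (fun c => c) false
  twoPointer xs ys 0 0

-- ===== PRECONDITION & SPEC =====
def Spec_czy_ukladalne (slowo1 : String) (slowo2 : String) (out : Bool) : Prop := out = czy_ukladalne_alt slowo1 slowo2
instance (slowo1 : String) (slowo2 : String) (out : Bool) : Decidable (Spec_czy_ukladalne slowo1 slowo2 out) := by unfold Spec_czy_ukladalne; infer_instance

-- ===== CLAIM (what is proved, stated in full; the proofs are below) =====
def Claim_equal_czy_ukladalne : Prop := ∀ (slowo1 : String) (slowo2 : String), Dom_czy_ukladalne slowo1 slowo2 → Spec_czy_ukladalne slowo1 slowo2 (czy_ukladalne slowo1 slowo2)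

-- ===== LEMMAS AND PROOFS =====

lemma slownik_eq_counter (s : List Char) : slownik s = PySem.Dict.counter s := by
  have hstep : (fun (his : PySem.Dict Char Int) e =>
      if his.contains e = false then his.insert e 1
      else his.insert e (his.getD e 0 + 1))
      = (fun (his : PySem.Dict Char Int) e => his.insert e (his.getD e 0 + 1)) := by
    funext his e
    by_cases h : his.contains e = false
    · have h0 : his.getD e 0 = 0 := PySem.Dict.getD_of_not_contains his 0 h
      simp [h, h0]
    · simp [h]
  rw [slownik, hstep, PySem.Dict.foldl_insert_getD_add_one_eq_counter]

lemma czyLoop_eq_all (d1 d2 : PySem.Dict Char Int) (l : List Char) :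
    czyLoop d1 d2 l = l.all (fun e => d2.contains e && decide (d1.getD e 0 ≤ d2.getD e 0)) := by
  induction l with
  | nil => rfl
  | cons e rest ih =>
    simp only [czyLoop, List.all_cons]
    split_ifs with h
    · simp [h, ih]
    · simp only [Bool.not_eq_true] at h
      simp [h]

-- proof-side view of the scan: the greedy recursion on the remaining suffixes
def jestPodciagiem : List Char → List Char → Bool
  | [], _ => true
  | _ :: _, [] => false
  | x :: xs, y :: ys => if x = y then jestPodciagiem xs ys else jestPodciagiem (x :: xs) ys

-- the index loop computes the greedy recursion on the dropped suffixes
lemma twoPointer_eq_jest (xs ys : List Char) : ∀ (k i j : Nat), ys.length - j ≤ k →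
    i ≤ xs.length → twoPointer xs ys i j = jestPodciagiem (xs.drop i) (ys.drop j) := by
  intro k
  induction k with
  | zero =>
    intro i j hk hi
    have hj : ys.length ≤ j := by omega
    rw [twoPointer, dif_neg (by omega), List.drop_eq_nil_of_le hj]
    rcases Nat.lt_or_ge i xs.length with hlt | hge
    · obtain ⟨c, t, ht⟩ : ∃ c t, xs.drop i = c :: t :=
        ⟨xs[i], xs.drop (i + 1), (List.getElem_cons_drop ..).symm⟩
      rw [ht]
      simp [jestPodciagiem]
      omega
    · have : i = xs.length := le_antisymm hi hge
      simp [this, jestPodciagiem]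
  | succ k ih =>
    intro i j hk hi
    rw [twoPointer]
    by_cases h : i < xs.length ∧ j < ys.length
    · rw [dif_pos h,
        show xs.drop i = xs[i]'h.1 :: xs.drop (i + 1) from (List.getElem_cons_drop ..).symm,
        show ys.drop j = ys[j]'h.2 :: ys.drop (j + 1) from (List.getElem_cons_drop ..).symm,
        jestPodciagiem]
      by_cases he : xs[i]'h.1 = ys[j]'h.2
      · rw [if_pos he, if_pos he, ih (i + 1) (j + 1) (by omega) (by omega)]
      · rw [if_neg he, if_neg he, ih i (j + 1) (by omega) hi,
          show xs[i]'h.1 :: xs.drop (i + 1) = xs.drop i from List.getElem_cons_drop ..]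
    · rw [dif_neg h]
      rcases Nat.lt_or_ge i xs.length with hlt | hge
      · have hj : ys.length ≤ j := by omega
        rw [List.drop_eq_nil_of_le hj,
          show xs.drop i = xs[i]'hlt :: xs.drop (i + 1) from (List.getElem_cons_drop ..).symm]
        simp [jestPodciagiem]
        omega
      · have : i = xs.length := le_antisymm hi hge
        simp [this, jestPodciagiem]

-- the greedy recursion decides the Sublist relation
lemma jestPodciagiem_iff_sublist (a b : List Char) :
    jestPodciagiem a b = true ↔ List.Sublist a b := by
  induction b generalizing a with
  | nil =>
    cases a with
    | nil => simp [jestPodciagiem]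
    | cons x xs => simp [jestPodciagiem]
  | cons y ys ih =>
    cases a with
    | nil => simp [jestPodciagiem]
    | cons x xs =>
      by_cases hxy : x = y
      · subst hxy
        simp [jestPodciagiem, ih, List.cons_sublist_cons]
      · simp only [jestPodciagiem, if_neg hxy, ih]
        constructor
        · exact fun h => h.cons y
        · intro h
          cases h with
          | cons _ h' => exact h'
          | cons₂ => exact absurd rfl hxy

-- A's loop condition is exactly multiset containment (subpermutation)
lemma czy_eq_subperm (slowo1 slowo2 : String) :
    czy_ukladalne slowo1 slowo2 = true ↔ List.Subperm slowo1.toList slowo2.toList := by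
  show czyLoop (slownik slowo1.toList) (slownik slowo2.toList) slowo1.toList = true ↔ _
  rw [czyLoop_eq_all, slownik_eq_counter, slownik_eq_counter, List.subperm_ext_iff]
  simp only [List.all_eq_true, Bool.and_eq_true, decide_eq_true_eq,
    PySem.Dict.getD_counter, PySem.Dict.contains_counter, List.contains_iff_mem]
  constructor
  · intro h e he
    exact_mod_cast (h e he).2
  · intro h e he
    refine ⟨?_, by exact_mod_cast h e he⟩
    have h1 : 0 < slowo1.toList.count e := List.count_pos_iff.mpr he
    simpa using List.count_pos_iff.mp (lt_of_lt_of_le h1 (h e he))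

-- ===== VERDICT (by name: the statement is the Claim_ definition above) =====
theorem czy_ukladalne_spec : Claim_equal_czy_ukladalne := by
  intro slowo1 slowo2 _
  show czy_ukladalne slowo1 slowo2 = czy_ukladalne_alt slowo1 slowo2
  rw [Bool.eq_iff_iff, czy_eq_subperm]
  rw [show czy_ukladalne_alt slowo1 slowo2
        = jestPodciagiem (PySem.List.sorted slowo1.toList (fun c => c) false)
            (PySem.List.sorted slowo2.toList (fun c => c) false) from
      twoPointer_eq_jest _ _ ((PySem.List.sorted slowo2.toList (fun c => c) false).length) 0 0 (by omega) (by omega),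
    jestPodciagiem_iff_sublist]
  have hp1 : (PySem.List.sorted slowo1.toList (fun c => c) false).Perm slowo1.toList := PySem.List.sorted_perm _ _ _
  have hp2 : (PySem.List.sorted slowo2.toList (fun c => c) false).Perm slowo2.toList := PySem.List.sorted_perm _ _ _
  have hs1 : (PySem.List.sorted slowo1.toList (fun c => c) false).Pairwise (· ≤ ·) := by
    simpa using PySem.List.sorted_pairwise slowo1.toList (fun c => c)
  have hs2 : (PySem.List.sorted slowo2.toList (fun c => c) false).Pairwise (· ≤ ·) := by
    simpa using PySem.List.sorted_pairwise slowo2.toList (fun c => c)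
  constructor
  · intro h
    exact List.sublist_of_subperm_of_pairwise
      ((hp1.subperm_right).mpr ((hp2.subperm_left).mpr h)) hs1 hs2
  · intro h
    exact (hp2.subperm_left).mp ((hp1.subperm_right).mp h.subperm)
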